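-- pv_equiv track=rewrite | github.com/Fozia31/Leetcode_quesion | 1464-reduce-array-size-to-the-half/1464-reduce-array-size-to-the-half.py | minSetSize
-- ===== SOURCE A (Python) =====
-- def minSetSize(arr):
--
--     freq_dict = {}
--     for num in arr:
--         if num in freq_dict:
--             freq_dict[num] += 1
--         else:
--             freq_dict[num] = 1
--
--     counter = sorted(freq_dict.values(), reverse=True)
--
--     removed, count, half_size = 0, 0, len(arr) // 2
--
--     for freq in counter:
--         removed += freq
--         count += 1
--         if removed >= half_size:
--             return count
--
--     return count
-- ===== SOURCE B (Python) =====
-- def minSetSize(arr):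
--     # Bucket counts of the frequency values (all in [1, n]), scanned greedily
--     # from the highest frequency down, instead of a comparison sort.
--     n = len(arr)
--
--     freq_dict = {}
--     for num in arr:
--         if num in freq_dict:
--             freq_dict[num] += 1
--         else:
--             freq_dict[num] = 1
--
--     bucket = {}
--     for v in freq_dict.values():
--         bucket[v] = bucket.get(v, 0) + 1
--
--     half = n // 2
--     removed, count, f = 0, 0, n
--     while f > 0:
--         if bucket.get(f, 0) == 0:
--             f -= 1
--         else:
--             bucket[f] -= 1
--             removed += f
--             count += 1
--             if removed >= half:
--                 return count
--     return count
-- ===== Notes on version B (the rewrite author's own statement) =====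
-- stated objective: alternative
-- what changed: Replaces sorting the frequency values by a frequency-of-frequency bucket dict scanned greedily from n down to 1.
import Mathlib
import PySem

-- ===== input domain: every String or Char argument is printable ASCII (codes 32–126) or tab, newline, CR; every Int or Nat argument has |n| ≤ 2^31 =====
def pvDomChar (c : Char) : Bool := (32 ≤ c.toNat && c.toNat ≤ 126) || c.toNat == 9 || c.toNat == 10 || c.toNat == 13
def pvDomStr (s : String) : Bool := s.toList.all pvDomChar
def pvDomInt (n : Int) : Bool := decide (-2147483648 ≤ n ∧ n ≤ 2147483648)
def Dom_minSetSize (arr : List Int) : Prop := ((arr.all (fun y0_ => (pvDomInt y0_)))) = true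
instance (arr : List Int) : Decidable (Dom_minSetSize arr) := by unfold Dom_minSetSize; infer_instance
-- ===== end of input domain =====

-- B replaces A's comparison sort of the frequency values by a frequency-of-frequency
-- bucket dict scanned greedily from n down to 1; same return value, different algorithm.

-- B replaces A's comparison sort of the frequency values by a frequency-of-frequency
-- bucket scanned from n down to 1; same return value, different algorithm.

-- ===== PORT A =====
-- 'for num in arr: if num in freq_dict: … else: …' (shared verbatim by A and B)
def pvCount (arr : List Int) : PySem.Dict Int Int :=
  arr.foldl
    (fun d num => if d.contains num then d.modify num 0 (· + 1) else d.insert num 1)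
    PySem.Dict.empty

-- 'for freq in counter: removed += freq; count += 1; if removed >= half_size: return count'
def pvALoop (l : List Int) (half removed count : Int) : Int :=
  match l with
  | [] => count
  | f :: t =>
      let removed := removed + f
      let count := count + 1
      if removed ≥ half then count else pvALoop t half removed count

def minSetSize (arr : List Int) : Int :=
  let freq_dict := pvCount arr
  let counter := PySem.List.sorted freq_dict.values (fun x => x) true
  let half_size := PySem.Int.floordiv (arr.length : Int) 2
  pvALoop counter half_size 0 0

-- ===== PORT B =====
-- 'while f > 0: if bucket.get(f, 0) == 0: f -= 1
--               else: bucket[f] -= 1; removed += f; count += 1; if removed >= half: return count'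
def pvBLoop (bucket : PySem.Dict Int Int) (half removed count : Int) (f : Nat) : Int :=
  if hf : f = 0 then count
  else if bucket.getD (f : Int) 0 = 0 then
    pvBLoop bucket half removed count (f - 1)
  else
    let bucket' := bucket.insert (f : Int) (bucket.getD (f : Int) 0 - 1)
    let removed' := removed + (f : Int)
    let count' := count + 1
    if removed' ≥ half then count'
    else pvBLoop bucket' half removed' count' f
  termination_by (f, (half - removed).toNat)
  decreasing_by
  · exact Prod.Lex.left _ _ (by omega)
  · apply Prod.Lex.right
    rename_i hlt
    simp only [not_le] at hlt
    omega

def minSetSize_alt (arr : List Int) : Int :=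
  let n := arr.length
  let freq_dict := pvCount arr
  let bucket := freq_dict.values.foldl (fun b v => b.insert v (b.getD v 0 + 1)) PySem.Dict.empty
  let half := PySem.Int.floordiv (n : Int) 2
  pvBLoop bucket half 0 0 n

-- ===== PRECONDITION & SPEC =====
def Spec_minSetSize (arr : List Int) (out : Int) : Prop := out = minSetSize_alt arr
instance (arr : List Int) (out : Int) : Decidable (Spec_minSetSize arr out) := by unfold Spec_minSetSize; infer_instance

-- ===== CLAIM (what is proved, stated in full; the proofs are below) =====
def Claim_equal_minSetSize : Prop := ∀ (arr : List Int), Dom_minSetSize arr → Spec_minSetSize arr (minSetSize arr)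

-- ===== LEMMAS AND PROOFS =====

-- A's counting loop builds exactly collections.Counter(arr)
theorem pvCount_eq_counter (arr : List Int) : pvCount arr = PySem.Dict.counter arr := by
  rw [PySem.Dict.counter_eq_foldl]
  unfold pvCount
  apply List.foldl_ext
  intro d num _
  by_cases h : d.contains num
  · simp [h]
  · simp only [Bool.not_eq_true] at h
    simp [h, PySem.Dict.modify, PySem.Dict.insert, PySem.Dict.getD_of_not_contains (h := h)]

-- the descending stream the bucket scan visits: f repeated bucket[f] times, then f-1, …
def pvDesc (b : PySem.Dict Int Int) : Nat → List Int
  | 0 => []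
  | f + 1 => List.replicate (b.getD ((f + 1 : Nat) : Int) 0).toNat ((f + 1 : Nat) : Int) ++ pvDesc b f

theorem pvDesc_congr (b b' : PySem.Dict Int Int) (f : Nat)
    (h : ∀ i : Nat, 1 ≤ i → i ≤ f → b.getD (i : Int) 0 = b'.getD (i : Int) 0) :
    pvDesc b f = pvDesc b' f := by
  induction f with
  | zero => rfl
  | succ m ih =>
    simp only [pvDesc]
    rw [h (m + 1) (by omega) (by omega), ih (fun i h1 h2 => h i h1 (by omega))]

theorem count_pvDesc (b : PySem.Dict Int Int) (f : Nat) (x : Int) :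
    (pvDesc b f).count x = if 1 ≤ x ∧ x ≤ (f : Int) then (b.getD x 0).toNat else 0 := by
  induction f with
  | zero =>
    simp only [pvDesc, List.count_nil, Nat.cast_zero]
    split_ifs with h
    · omega
    · rfl
  | succ m ih =>
    simp only [pvDesc, List.count_append, List.count_replicate, ih, beq_iff_eq]
    by_cases hx : ((m + 1 : Nat) : Int) = x
    · subst hx
      have h1 : ¬ (1 ≤ ((m + 1 : Nat) : Int) ∧ ((m + 1 : Nat) : Int) ≤ (m : Int)) := by push_cast; omega
      have h2 : (1 ≤ ((m + 1 : Nat) : Int) ∧ ((m + 1 : Nat) : Int) ≤ ((m + 1 : Nat) : Int)) := by push_cast; omega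
      simp
    · simp only [if_neg hx, Nat.zero_add]
      split_ifs with h1 h2 h2
      · rfl
      · push_cast at h1 h2 hx; omega
      · push_cast at h1 h2 hx; omega
      · rfl

theorem pairwise_pvDesc (b : PySem.Dict Int Int) (f : Nat) :
    (pvDesc b f).Pairwise (fun a c => c ≤ a) ∧ ∀ x ∈ pvDesc b f, x ≤ (f : Int) := by
  induction f with
  | zero => simp [pvDesc]
  | succ m ih =>
    obtain ⟨hp, hm⟩ := ih
    constructor
    · rw [pvDesc, List.pairwise_append]
      refine ⟨List.pairwise_replicate.2 (by simp), hp, ?_⟩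
      intro a ha c hc
      rcases List.eq_of_mem_replicate ha with rfl
      have := hm c hc
      push_cast
      push_cast at this
      omega
    · intro x hx
      rw [pvDesc, List.mem_append] at hx
      rcases hx with hx | hx
      · rcases List.eq_of_mem_replicate hx with rfl; exact le_rfl
      · have := hm x hx
        push_cast
        push_cast at this
        omega

-- the descending stream of Counter(V) is sorted(V, reverse=True)
theorem pvDesc_eq_sorted (V : List Int) (n : Nat) (hv : ∀ v ∈ V, 1 ≤ v ∧ v ≤ (n : Int)) :
    PySem.List.sorted V (fun x => x) true = pvDesc (PySem.Dict.counter V) n := by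
  have hperm : (PySem.List.sorted V (fun x => x) true).Perm (pvDesc (PySem.Dict.counter V) n) := by
    refine (PySem.List.sorted_perm V _ _).trans (List.perm_iff_count.2 ?_)
    intro x
    rw [count_pvDesc, PySem.Dict.getD_counter]
    split_ifs with h
    · simp
    · exact List.count_eq_zero.2 (fun hx => h (hv x hx))
  refine PySem.List.eq_of_perm_of_pairwise_le_of_injective (fun x => -x) neg_injective hperm ?_ ?_
  · exact (PySem.List.sorted_pairwise_rev V _).imp (fun h => by simpa using h)
  · exact (pairwise_pvDesc _ n).1.imp (fun h => by simpa using h)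

-- the bucket scan is A's scan of the descending stream
theorem pvBLoop_eq_pvALoop (b0 : PySem.Dict Int Int) (half removed0 count0 : Int) (f0 : Nat) :
    (∀ k : Int, 0 ≤ b0.getD k 0) →
    pvBLoop b0 half removed0 count0 f0 = pvALoop (pvDesc b0 f0) half removed0 count0 := by
  refine pvBLoop.induct half
    (motive := fun b removed count f =>
      (∀ k : Int, 0 ≤ b.getD k 0) →
      pvBLoop b half removed count f = pvALoop (pvDesc b f) half removed count)
    ?_ ?_ ?_ ?_ b0 removed0 count0 f0
  · intro b removed count _
    simp [pvBLoop, pvDesc, pvALoop]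
  · -- skip an empty bucket: f -= 1
    intro b removed count f hf h0 ih hnn
    obtain ⟨m, rfl⟩ : ∃ m, f = m + 1 := ⟨f - 1, by omega⟩
    rw [pvBLoop, dif_neg hf, if_pos h0]
    simp only [Nat.add_sub_cancel] at ih ⊢
    rw [ih hnn, pvDesc, h0]
    simp only [Int.toNat_zero, List.replicate_zero, List.nil_append]
  · -- take one element and reach the threshold
    intro b removed count f hf h0 removedp hge0 hnn
    obtain ⟨m, rfl⟩ : ∃ m, f = m + 1 := ⟨f - 1, by omega⟩
    have hge : removed + ((m + 1 : Nat) : Int) ≥ half := hge0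
    have ht : 1 ≤ (b.getD ((m + 1 : Nat) : Int) 0).toNat := by
      have h1 := hnn ((m + 1 : Nat) : Int)
      have h2 : b.getD ((m + 1 : Nat) : Int) 0 ≠ 0 := h0
      omega
    obtain ⟨t, ht'⟩ : ∃ t, (b.getD ((m + 1 : Nat) : Int) 0).toNat = t + 1 :=
      ⟨(b.getD ((m + 1 : Nat) : Int) 0).toNat - 1, by omega⟩
    rw [pvBLoop, dif_neg hf, if_neg h0, if_pos hge, pvDesc, ht', List.replicate_succ,
      List.cons_append]
    rw [pvALoop]
    simp only [if_pos hge]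
  · -- take one element and continue
    intro b removed count f hf h0 bucketp removedp countp hlt0 ih hnn
    obtain ⟨m, rfl⟩ : ∃ m, f = m + 1 := ⟨f - 1, by omega⟩
    have hlt : ¬ (removed + ((m + 1 : Nat) : Int) ≥ half) := hlt0
    have ht : 1 ≤ (b.getD ((m + 1 : Nat) : Int) 0).toNat := by
      have h1 := hnn ((m + 1 : Nat) : Int)
      have h2 : b.getD ((m + 1 : Nat) : Int) 0 ≠ 0 := h0
      omega
    obtain ⟨t, ht'⟩ : ∃ t, (b.getD ((m + 1 : Nat) : Int) 0).toNat = t + 1 :=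
      ⟨(b.getD ((m + 1 : Nat) : Int) 0).toNat - 1, by omega⟩
    have hnn' : ∀ k : Int,
        0 ≤ (b.insert ((m + 1 : Nat) : Int) (b.getD ((m + 1 : Nat) : Int) 0 - 1)).getD k 0 := by
      intro k
      rw [PySem.Dict.getD_insert]
      split_ifs with hk
      · have := hnn ((m + 1 : Nat) : Int); omega
      · exact hnn k
    have hg : ((b.insert ((m + 1 : Nat) : Int) (b.getD ((m + 1 : Nat) : Int) 0 - 1)).getD
        ((m + 1 : Nat) : Int) 0).toNat = t := by
      rw [PySem.Dict.getD_insert_self]; omega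
    have hc : pvDesc (b.insert ((m + 1 : Nat) : Int) (b.getD ((m + 1 : Nat) : Int) 0 - 1)) m
        = pvDesc b m := by
      apply pvDesc_congr
      intro i h1 h2
      rw [PySem.Dict.getD_insert_of_ne]
      intro hi
      have hii : (i : Int) = ((m + 1 : Nat) : Int) := hi
      push_cast at hii
      omega
    have e1 : pvDesc (b.insert ((m + 1 : Nat) : Int) (b.getD ((m + 1 : Nat) : Int) 0 - 1)) (m + 1)
        = List.replicate t ((m + 1 : Nat) : Int) ++ pvDesc b m := by
      rw [pvDesc, hg, hc]
    have e2 : pvDesc b (m + 1)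
        = ((m + 1 : Nat) : Int) :: (List.replicate t ((m + 1 : Nat) : Int) ++ pvDesc b m) := by
      rw [pvDesc, ht', List.replicate_succ, List.cons_append]
    rw [pvBLoop, dif_neg hf, if_neg h0, if_neg hlt, ih hnn', e1, e2]
    conv_rhs => rw [pvALoop]
    simp only [if_neg hlt]
    rfl

theorem values_counter_bounds (arr : List Int) :
    ∀ v ∈ (PySem.Dict.counter arr).values, 1 ≤ v ∧ v ≤ (arr.length : Int) := by
  intro v hv
  have : (PySem.Dict.counter arr).values
      = ((PySem.Set.ofList arr).map (fun k => (k, (arr.count k : Int)))).map (·.2) := by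
    show (PySem.Dict.counter arr).items.map (·.2) = _
    rw [PySem.Dict.items_counter]
  rw [this, List.map_map, List.mem_map] at hv
  obtain ⟨k, hk, rfl⟩ := hv
  have hk' : k ∈ arr := (PySem.Set.mem_ofList arr k).1 hk
  have h1 : 1 ≤ arr.count k := List.count_pos_iff.2 hk'
  have h2 : arr.count k ≤ arr.length := List.count_le_length
  constructor <;> simp <;> omega

theorem minSetSize_eq (arr : List Int) : minSetSize arr = minSetSize_alt arr := by
  show pvALoop (PySem.List.sorted (pvCount arr).values (fun x => x) true)
      (PySem.Int.floordiv (arr.length : Int) 2) 0 0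
    = pvBLoop ((pvCount arr).values.foldl (fun b v => b.insert v (b.getD v 0 + 1)) PySem.Dict.empty)
      (PySem.Int.floordiv (arr.length : Int) 2) 0 0 arr.length
  rw [pvCount_eq_counter, PySem.Dict.foldl_insert_getD_add_one_eq_counter,
    pvBLoop_eq_pvALoop _ _ _ _ _
      (fun k => by rw [PySem.Dict.getD_counter]; exact Int.natCast_nonneg _),
    ← pvDesc_eq_sorted _ _ (values_counter_bounds arr)]

-- ===== VERDICT (by name: the statement is the Claim_ definition above) =====
theorem minSetSize_spec : Claim_equal_minSetSize := by
  intro arr _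
  unfold Spec_minSetSize
  exact minSetSize_eq arr
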